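-- pv_equiv track=rewrite | github.com/adrian-trustap/API_explore | api_tree.py | find_duplicate_endpoint_names
-- ===== SOURCE A (Python) =====
-- from collections import defaultdict
-- from collections import Counter, defaultdict
--
-- def find_duplicate_endpoint_names(spec):
--     """
--     Find duplicates based only on the final path segment (endpoint name).
--     """
--     counter = defaultdict(list)  # name -> list of (path, method)
--
--     for path, methods in spec.get('paths', {}).items():
--         endpoint_name = path.strip('/').split('/')[-1]
--         for method in methods.keys():
--             counter[endpoint_name].append((path, method.upper()))
--
--     duplicates = {name: entries for name, entries in counter.items() if len(entries) > 1}
--     return duplicates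
-- ===== SOURCE B (Python) =====
-- def find_duplicate_endpoint_names(spec):
--     """Flatten to one entry list, then keep exactly the entries whose endpoint
--     name occurs at some OTHER position of the list (a per-entry duplicate test,
--     no grouping dict, no counter)."""
--     entries = []
--     for path, methods in spec.get('paths', {}).items():
--         name = path.strip('/').split('/')[-1]
--         for method in methods:
--             entries.append((name, path, method.upper()))
--     names = [e[0] for e in entries]
--     result = {}
--     for i, (name, path, method) in enumerate(entries):
--         if name in names[:i] or name in names[i + 1:]:
--             result.setdefault(name, []).append((path, method))
--     return result
-- ===== Notes on version B (the rewrite author's own statement) =====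
-- stated objective: alternative
-- what changed: A groups every (path, METHOD) entry into a dict of lists keyed by endpoint name and then filters the finished groups by size; B flattens the spec to one entry list once and then, per entry, tests whether its name occurs at any OTHER position of the flat list (no grouping dict, no counting), appending only the entries that pass.
import Mathlib
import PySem

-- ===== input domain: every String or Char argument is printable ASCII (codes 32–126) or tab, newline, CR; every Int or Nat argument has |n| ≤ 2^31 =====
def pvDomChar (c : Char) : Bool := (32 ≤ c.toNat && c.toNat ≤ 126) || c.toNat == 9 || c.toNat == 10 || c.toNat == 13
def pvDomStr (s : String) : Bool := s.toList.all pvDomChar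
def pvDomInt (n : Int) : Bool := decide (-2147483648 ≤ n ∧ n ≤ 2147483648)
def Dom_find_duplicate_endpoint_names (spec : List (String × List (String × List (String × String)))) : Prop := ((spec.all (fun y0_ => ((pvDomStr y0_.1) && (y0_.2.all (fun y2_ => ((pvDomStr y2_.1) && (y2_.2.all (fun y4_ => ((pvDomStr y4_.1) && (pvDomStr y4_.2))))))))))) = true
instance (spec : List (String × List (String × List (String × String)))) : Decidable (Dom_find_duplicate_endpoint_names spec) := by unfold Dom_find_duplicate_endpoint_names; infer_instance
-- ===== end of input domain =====

-- B replaces A's "group every name into a dict of lists, then filter the groups by size"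
-- with "flatten to one entry list, then keep each entry whose name occurs at some OTHER
-- position" — a per-entry duplicate test over the flat list, no grouping-then-filtering
-- (objective: alternative).

-- ===== PORT A =====
-- path.strip('/').split('/')[-1]: split? is exact here since the separator "/" is nonempty,
-- and a split result is never empty, so the [-1] default is never reached.
def find_duplicate_endpoint_names (spec : List (String × List (String × List (String × String)))) : List (String × List (String × String)) :=
  let counter :=
    (PySem.Dict.ofList ((PySem.Dict.ofList spec).getD "paths" [])).items.foldl
      (fun d pm =>
        let endpoint_name :=
          PySem.List.pyGetD ((PySem.Str.split? (PySem.Str.stripChars pm.1 "/") "/").getD []) (-1) ""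
        (PySem.Dict.ofList pm.2).keys.foldl
          (fun d m => d.modify endpoint_name [] (· ++ [(pm.1, PySem.Str.upper m)])) d)
      PySem.Dict.empty
  counter.items.filter (fun p => 1 < p.2.length)

-- ===== PORT B =====
def pvEndpointName (path : String) : String :=
  PySem.List.pyGetD ((PySem.Str.split? (PySem.Str.stripChars path "/") "/").getD []) (-1) ""

def find_duplicate_endpoint_names_alt (spec : List (String × List (String × List (String × String)))) : List (String × List (String × String)) :=
  let paths := PySem.Dict.ofList ((PySem.Dict.ofList spec).getD "paths" [])
  -- entries.append((name, path, method.upper()))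
  let entries := paths.items.foldl
    (fun acc pm =>
      let name := pvEndpointName pm.1
      (PySem.Dict.ofList pm.2).keys.foldl
        (fun acc m => acc ++ [(name, pm.1, PySem.Str.upper m)]) acc)
    []
  let names := entries.map (fun e => e.1)
  -- for i, (name, path, method) in enumerate(entries): if name in names[:i] or name in names[i+1:] ...
  let result := (PySem.List.enumerate entries 0).foldl
    (fun r p =>
      if (PySem.List.slice names none (some p.1)).contains p.2.1
          || (PySem.List.slice names (some (p.1 + 1)) none).contains p.2.1 then
        -- result.setdefault(name, []).append((path, method)) ≡ modify with default []
        r.modify p.2.1 [] (· ++ [(p.2.2.1, p.2.2.2)])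
      else r)
    PySem.Dict.empty
  result.items

-- ===== PRECONDITION & SPEC =====
def Spec_find_duplicate_endpoint_names (spec : List (String × List (String × List (String × String)))) (out : List (String × List (String × String))) : Prop := out = find_duplicate_endpoint_names_alt spec
instance (spec : List (String × List (String × List (String × String)))) (out : List (String × List (String × String))) : Decidable (Spec_find_duplicate_endpoint_names spec out) := by unfold Spec_find_duplicate_endpoint_names; infer_instance

-- ===== CLAIM (what is proved, stated in full; the proofs are below) =====
def Claim_equal_find_duplicate_endpoint_names : Prop := ∀ (spec : List (String × List (String × List (String × String)))), Dom_find_duplicate_endpoint_names spec → Spec_find_duplicate_endpoint_names spec (find_duplicate_endpoint_names spec)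

-- ===== LEMMAS AND PROOFS =====

-- the (name, (path, METHOD)) entries contributed by one path item
def pvSeg (pm : String × List (String × String)) : List (String × (String × String)) :=
  (PySem.Dict.ofList pm.2).keys.map (fun m => (pvEndpointName pm.1, (pm.1, PySem.Str.upper m)))

-- the flat entry list of the whole paths dict
def pvEntries (items : List (String × List (String × String))) : List (String × (String × String)) :=
  items.flatMap pvSeg

-- the grouping fold A runs (and B runs on the filtered entries)
def pvGroup (l : List (String × (String × String))) : PySem.Dict String (List (String × String)) :=
  l.foldl (fun d e => d.modify e.1 [] (· ++ [e.2])) PySem.Dict.empty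

theorem pvGroup_items (l : List (String × (String × String))) :
    (pvGroup l).items =
      (PySem.Set.ofList (l.map (·.1))).map
        (fun k => (k, (l.filter (fun e => e.1 == k)).map (·.2))) := by
  have hnd : (pvGroup l).keys.Nodup := by
    unfold pvGroup
    exact PySem.Dict.nodup_keys_foldl_modify_key l (fun e => e.1) [] (fun _ e => (· ++ [e.2]))
      PySem.Dict.empty (by simp)
  have hkeys : (pvGroup l).keys = PySem.Set.ofList (l.map (·.1)) := by
    have h1 := PySem.Dict.keys_foldl_modify_key l (fun e => e.1) [] (fun _ e => (· ++ [e.2]))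
      PySem.Dict.empty
    simp only [PySem.Dict.keys_empty, PySem.Set.update_nil_left] at h1
    unfold pvGroup
    exact h1
  rw [PySem.Dict.items_eq_map_keys _ hnd [], hkeys]
  apply List.map_congr_left
  intro k _
  have h2 := PySem.Dict.getD_foldl_modify_append l PySem.Dict.empty k
  simp only [PySem.Dict.getD_empty, List.nil_append] at h2
  unfold pvGroup
  rw [h2]

theorem pvFilter_add {α : Type} [BEq α] [LawfulBEq α] (q : α → Bool) (s : List α) (x : α) :
    (PySem.Set.add s x).filter q = if q x then PySem.Set.add (s.filter q) x else s.filter q := by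
  by_cases hq : q x
  · simp only [hq, if_true, PySem.Set.add, PySem.Set.contains]
    by_cases hc : x ∈ s
    · simp [hc, List.mem_filter, hq]
    · simp [hc, List.mem_filter, List.filter_append, hq]
  · simp only [hq, PySem.Set.add, PySem.Set.contains]
    by_cases hc : x ∈ s
    · simp [hc]
    · simp [hc, List.filter_append, hq]

theorem pvSet_ofList_filter {α : Type} [BEq α] [LawfulBEq α] (q : α → Bool) (xs : List α) :
    PySem.Set.ofList (xs.filter q) = (PySem.Set.ofList xs).filter q := by
  induction xs using List.reverseRecOn with
  | nil => simp
  | append_singleton xs x ih =>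
    rw [List.filter_append, PySem.Set.ofList_append_singleton, pvFilter_add]
    by_cases hq : q x
    · simp [hq, PySem.Set.ofList_append_singleton, ih]
    · simp [hq, ih]

theorem pvCount (E : List (String × (String × String))) (k : String) :
    (E.map (·.1)).count k = (E.filter (fun e => e.1 == k)).length := by
  rw [List.count_eq_countP, List.countP_map, List.countP_eq_length_filter]
  rfl

-- A's nested loop is the grouping fold over the flat entry list
theorem pvA_eq (items : List (String × List (String × String))) :
    (items.foldl
      (fun d pm =>
        (PySem.Dict.ofList pm.2).keys.foldl
          (fun d m => d.modify
            (PySem.List.pyGetD ((PySem.Str.split? (PySem.Str.stripChars pm.1 "/") "/").getD []) (-1) "")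
            [] (· ++ [(pm.1, PySem.Str.upper m)])) d)
      PySem.Dict.empty) = pvGroup (pvEntries items) := by
  unfold pvGroup pvEntries
  rw [List.foldl_flatMap]
  apply PySem.List.foldl_congr_mem
  intro d pm _
  unfold pvSeg
  rw [List.foldl_map]
  apply PySem.List.foldl_congr_mem
  intro d m _
  simp [pvEndpointName]

-- filtering the finished groups by size = grouping only the duplicated entries
theorem pvFiltered (E : List (String × (String × String))) :
    (pvGroup E).items.filter (fun p => 1 < p.2.length)
      = (pvGroup (E.filter (fun e => decide (1 < (E.map (·.1)).count e.1)))).items := by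
  rw [pvGroup_items, pvGroup_items, List.filter_map]
  have hns : (E.filter (fun e => decide (1 < (E.map (·.1)).count e.1))).map (·.1)
      = (E.map (·.1)).filter (fun n => decide (1 < (E.map (·.1)).count n)) := by
    rw [List.filter_map]
    rfl
  rw [hns, pvSet_ofList_filter]
  rw [List.filter_congr (q := fun k => decide (1 < (E.map (·.1)).count k))
    (by intro k _; simp [Function.comp, pvCount])]
  apply List.map_congr_left
  intro k hk
  have hq : 1 < (E.map (·.1)).count k := by
    have := (List.mem_filter.mp hk).2
    simpa using this
  refine congrArg (Prod.mk k) ?_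
  refine congrArg _ ?_
  rw [List.filter_filter]
  apply List.filter_congr
  intro a _
  by_cases h1 : a.1 == k
  · have : a.1 = k := by simpa using h1
    simp [this, hq]
  · simp [h1]

-- B's entry-building nested loop is the flat entry list
theorem pvB_entries (items : List (String × List (String × String))) :
    (items.foldl
      (fun acc pm =>
        (PySem.Dict.ofList pm.2).keys.foldl
          (fun acc m => acc ++ [(pvEndpointName pm.1, pm.1, PySem.Str.upper m)]) acc)
      ([] : List (String × String × String)))
      = pvEntries items := by
  unfold pvEntries
  induction items using List.reverseRecOn with
  | nil => rfl
  | append_singleton xs x ih =>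
    rw [List.foldl_append, List.flatMap_append, ih, List.foldl_cons, List.foldl_nil,
      PySem.List.foldl_append_singleton_eq_map]
    simp [pvSeg]

-- the per-entry duplicate test at position k of a list is a count test
theorem pvDupTest (l : List String) (k : Nat) (h : k < l.length) :
    ((l.take k).contains l[k] || (l.drop (k + 1)).contains l[k])
      = decide (1 < l.count l[k]) := by
  have hd : l.drop k = l[k] :: l.drop (k + 1) := List.drop_eq_getElem_cons h
  obtain ⟨a, ha⟩ : ∃ a, l[k] = a := ⟨_, rfl⟩
  rw [ha] at hd ⊢
  have hcnt : l.count a = (l.take k).count a + ((l.drop (k + 1)).count a + 1) := by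
    conv_lhs => rw [← List.take_append_drop k l]
    rw [List.count_append, hd, List.count_cons]
    simp
  have h1 : (l.take k).contains a = decide (0 < (l.take k).count a) := by
    simp [List.count_pos_iff]
  have h2 : (l.drop (k + 1)).contains a = decide (0 < (l.drop (k + 1)).count a) := by
    simp [List.count_pos_iff]
  rw [h1, h2, hcnt]
  by_cases hb1 : 0 < (l.take k).count a <;> by_cases hb2 : 0 < (l.drop (k + 1)).count a <;>
    simp [hb1, hb2] <;> omega

-- B's guarded enumerate-loop groups exactly the duplicated entries
theorem pvB_fold (E3 : List (String × String × String)) :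
    ((PySem.List.enumerate E3 0).foldl
      (fun r p =>
        if (PySem.List.slice (E3.map (fun e => e.1)) none (some p.1)).contains p.2.1
            || (PySem.List.slice (E3.map (fun e => e.1)) (some (p.1 + 1)) none).contains p.2.1 then
          r.modify p.2.1 [] (· ++ [(p.2.2.1, p.2.2.2)])
        else r)
      PySem.Dict.empty)
    = pvGroup (E3.filter (fun e => decide (1 < (E3.map (fun e => e.1)).count e.1))) := by
  have hstep : ((PySem.List.enumerate E3 0).foldl
      (fun r p =>
        if (PySem.List.slice (E3.map (fun e => e.1)) none (some p.1)).contains p.2.1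
            || (PySem.List.slice (E3.map (fun e => e.1)) (some (p.1 + 1)) none).contains p.2.1 then
          r.modify p.2.1 [] (· ++ [(p.2.2.1, p.2.2.2)])
        else r)
      PySem.Dict.empty)
      = ((PySem.List.enumerate E3 0).foldl
      (fun r p =>
        if 1 < (E3.map (fun e => e.1)).count p.2.1 then
          r.modify p.2.1 [] (· ++ [(p.2.2.1, p.2.2.2)])
        else r)
      PySem.Dict.empty) := by
    apply PySem.List.foldl_congr_mem
    intro r p hp
    obtain ⟨k, hk, rfl⟩ := (PySem.List.mem_enumerate_iff _ _ _).mp hp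
    have hk' : k < (E3.map (fun e => e.1)).length := by simpa using hk
    have hfst : E3[k].1 = (E3.map (fun e => e.1))[k] := by simp
    have hsl1 : PySem.List.slice (E3.map (fun e => e.1)) none (some ((0 : Int) + (k : Nat)))
        = (E3.map (fun e => e.1)).take k := by
      rw [show ((0 : Int) + (k : Nat)) = ((k : Nat) : Int) by omega,
        PySem.List.slice_to_natCast]
    have hsl2 : PySem.List.slice (E3.map (fun e => e.1)) (some ((0 : Int) + (k : Nat) + 1)) none
        = (E3.map (fun e => e.1)).drop (k + 1) := by
      rw [show ((0 : Int) + (k : Nat) + 1) = (((k + 1 : Nat) : Nat) : Int) by push_cast; omega,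
        PySem.List.slice_from_natCast]
    rw [hsl1, hsl2, hfst, pvDupTest _ k hk']
    by_cases hc : 1 < (E3.map (fun e => e.1)).count (E3.map (fun e => e.1))[k]
    · rw [if_pos (by simpa using hc), if_pos hc]
    · rw [if_neg (by simpa using hc), if_neg hc]
  rw [hstep]
  have hfac : ((PySem.List.enumerate E3 0).foldl
      (fun r p =>
        if 1 < (E3.map (fun e => e.1)).count p.2.1 then
          r.modify p.2.1 [] (· ++ [(p.2.2.1, p.2.2.2)])
        else r)
      PySem.Dict.empty)
      = E3.foldl
        (fun r e =>
          if 1 < (E3.map (fun e => e.1)).count e.1 then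
            r.modify e.1 [] (· ++ [(e.2.1, e.2.2)])
          else r)
        PySem.Dict.empty := by
    rw [← PySem.List.map_snd_enumerate E3 0, List.foldl_map]
    rw [PySem.List.map_snd_enumerate]
  rw [hfac]
  unfold pvGroup
  rw [List.foldl_filter]
  apply PySem.List.foldl_congr_mem
  intro r e _
  by_cases hc : 1 < (E3.map (fun e => e.1)).count e.1
  · simp [hc]
  · simp [hc]

theorem find_duplicate_endpoint_names_spec' (spec : List (String × List (String × List (String × String)))) :
    find_duplicate_endpoint_names spec = find_duplicate_endpoint_names_alt spec := by
  simp only [find_duplicate_endpoint_names, find_duplicate_endpoint_names_alt]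
  rw [pvA_eq, pvFiltered, pvB_entries, pvB_fold]

-- ===== VERDICT (by name: the statement is the Claim_ definition above) =====
theorem find_duplicate_endpoint_names_spec : Claim_equal_find_duplicate_endpoint_names := by
  intro spec _
  exact find_duplicate_endpoint_names_spec' spec
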